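-- pv_equiv track=rewrite | github.com/filipj96/genAI-demo | backend/chat.py | chat_history_chat_format
-- ===== SOURCE A (Python) =====
-- from collections import deque
--
-- def chat_history_chat_format(history: list[dict], sys_message: str, approx_max_tokens=1000):
--     messages_deque = deque()
--     for h in reversed(history):
--         messages_deque.appendleft(
--             {"role": "assistant", "content": h.get("answer") if h.get("answer") else ""})
--         messages_deque.appendleft(
--             {"role": "user", "content": h.get("question")})
--     messages_deque.appendleft(
--         {"role": "system", "content": sys_message})
--
--     return list(messages_deque)
-- ===== SOURCE B (Python) =====
-- def chat_history_chat_format(history: list[dict], sys_message: str, approx_max_tokens=1000):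
--     return [{"role": "system", "content": sys_message}] + [
--         m
--         for h in history
--         for m in (
--             {"role": "user", "content": h.get("question")},
--             {"role": "assistant", "content": h.get("answer") or ""},
--         )
--     ]
-- ===== Notes on version B (the rewrite author's own statement) =====
-- stated objective: simpler
-- what changed: Builds the message list forward as a flat comprehension over history (system message prepended once), instead of iterating history reversed and pushing pairs onto the left of a deque.
import Mathlib
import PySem

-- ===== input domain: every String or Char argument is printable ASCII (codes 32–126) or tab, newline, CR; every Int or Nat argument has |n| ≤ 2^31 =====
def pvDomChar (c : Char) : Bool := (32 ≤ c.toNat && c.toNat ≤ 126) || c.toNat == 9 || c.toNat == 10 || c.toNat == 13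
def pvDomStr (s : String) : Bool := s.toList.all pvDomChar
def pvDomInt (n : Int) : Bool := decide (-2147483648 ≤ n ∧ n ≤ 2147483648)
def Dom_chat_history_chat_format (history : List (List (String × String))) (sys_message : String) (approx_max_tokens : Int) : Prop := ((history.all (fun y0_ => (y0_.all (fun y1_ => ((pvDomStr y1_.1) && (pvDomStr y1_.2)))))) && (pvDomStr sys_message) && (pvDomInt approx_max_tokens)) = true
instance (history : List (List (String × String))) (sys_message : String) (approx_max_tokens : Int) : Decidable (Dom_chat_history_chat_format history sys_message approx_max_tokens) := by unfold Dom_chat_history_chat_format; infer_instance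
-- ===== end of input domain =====

-- B builds the message list forward as system-cons-flatMap instead of A's reversed
-- iteration pushing pairs onto the left of a deque; same O(n) cost, simpler shape.

-- ===== PORT A =====
-- dicts are assoc lists; h.get(k) = first match = List.lookup
def chat_history_chat_format (history : List (List (String × String))) (sys_message : String) (approx_max_tokens : Int) : List (List (String × String)) :=
  let messages_deque : List (List (String × String)) :=
    history.reverse.foldl (fun acc h =>
      -- appendleft assistant, then appendleft user ⇒ user :: assistant :: acc
      [("role", "user"), ("content", (h.lookup "question").getD "")] ::
      [("role", "assistant"),
       ("content", match h.lookup "answer" with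
                   | some a => if a == "" then "" else a   -- `x if x else ""`: "" is the only falsy str
                   | none => "")] :: acc) []
  [("role", "system"), ("content", sys_message)] :: messages_deque

-- ===== PORT B =====
-- Python's `x or ""` on Optional[str]: none and "" both give ""
def pvOrEmpty (o : Option String) : String := o.getD ""

def chat_history_chat_format_alt (history : List (List (String × String))) (sys_message : String) (approx_max_tokens : Int) : List (List (String × String)) :=
  [("role", "system"), ("content", sys_message)] ::
    history.flatMap (fun h =>
      [[("role", "user"), ("content", (h.lookup "question").getD "")],
       [("role", "assistant"), ("content", pvOrEmpty (h.lookup "answer"))]])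

-- ===== PRECONDITION & SPEC =====
-- Pre_ excludes histories where some entry lacks a "question" key: there Python A returns
-- a dict whose "content" is None, which is not a String of the declared return type.
def Pre_chat_history_chat_format (history : List (List (String × String))) (sys_message : String) (approx_max_tokens : Int) : Prop :=
  ∀ h ∈ history, (h.lookup "question").isSome
instance (history : List (List (String × String))) (sys_message : String) (approx_max_tokens : Int) : Decidable (Pre_chat_history_chat_format history sys_message approx_max_tokens) := by unfold Pre_chat_history_chat_format; infer_instance

def pvWitness_chat_history_chat_format : (List (List (String × String))) × String × Int :=
  ([[("question", "hi"), ("answer", "hello")], [("question", "q2")]], "be nice", 1000)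

def Spec_chat_history_chat_format (history : List (List (String × String))) (sys_message : String) (approx_max_tokens : Int) (out : List (List (String × String))) : Prop := out = chat_history_chat_format_alt history sys_message approx_max_tokens
instance (history : List (List (String × String))) (sys_message : String) (approx_max_tokens : Int) (out : List (List (String × String))) : Decidable (Spec_chat_history_chat_format history sys_message approx_max_tokens out) := by unfold Spec_chat_history_chat_format; infer_instance

-- ===== CLAIM (what is proved, stated in full; the proofs are below) =====
def Claim_equal_chat_history_chat_format : Prop := ∀ (history : List (List (String × String))) (sys_message : String) (approx_max_tokens : Int), Dom_chat_history_chat_format history sys_message approx_max_tokens → Pre_chat_history_chat_format history sys_message approx_max_tokens → Spec_chat_history_chat_format history sys_message approx_max_tokens (chat_history_chat_format history sys_message approx_max_tokens)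

-- ===== LEMMAS AND PROOFS =====
-- folding prepends over the reversed list = flatMap in order
theorem foldl_reverse_cons2 {α β : Type} (u a : α → β) :
    ∀ (l : List α) (acc : List β),
      l.reverse.foldl (fun acc h => u h :: a h :: acc) acc
        = l.flatMap (fun h => [u h, a h]) ++ acc := by
  intro l
  induction l with
  | nil => intro acc; simp
  | cons x xs ih =>
      intro acc
      simp [List.foldl_append, ih]

theorem orEmpty_eq (o : Option String) :
    (match o with
     | some a => if a == "" then "" else a
     | none => "") = pvOrEmpty o := by
  cases o with
  | none => rfl
  | some a =>
      simp only [pvOrEmpty, Option.getD_some]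
      by_cases h : a = "" <;> simp [h]

-- ===== VERDICT (by name: the statement is the Claim_ definition above) =====
theorem chat_history_chat_format_spec : Claim_equal_chat_history_chat_format := by
  intro history sys_message approx_max_tokens _ _
  unfold Spec_chat_history_chat_format chat_history_chat_format chat_history_chat_format_alt
  simp only [orEmpty_eq]
  rw [foldl_reverse_cons2]
  simp
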